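-- pv_equiv track=rewrite | github.com/apexorange/av-transcript-uplink | working/refactoring_progress.py | assemble_lines
-- ===== SOURCE A (Python) =====
-- def assemble_lines(tagged_lines: list) -> list:
--     """
--     This function iterates through the `tagged_lines_lst` list,
--     and when it finds a `True` line, it starts concatenating the `False`
--     lines that follow until it hits another `True` line. It then prints the concatenated result.
--     This ensures all `False` lines are included with the preceding `True` line.
--     """
--
--     cap_strings_lst = ["<OBJ>", "<OTHER>", "<NAME>"]
--     assembled_lines = []
--     for i, e in enumerate(tagged_lines):
--         if tagged_lines[i][2]:
--             if tagged_lines[i][1] not in cap_strings_lst: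
--                 output = tagged_lines[i][0]
--                 i += 1
--                 while i < len(tagged_lines) and not tagged_lines[i][2]:
--                     output += " " + tagged_lines[i][0]
--                     i += 1
--                 assembled_lines.append(output)
--             else:
--                 output = tagged_lines[i][1] + " " + tagged_lines[i][0]
--                 i += 1
--                 while i < len(tagged_lines) and not tagged_lines[i][2]:
--                     output += " " + tagged_lines[i][0].upper()
--                     i += 1
--                 assembled_lines.append(output)
--     return assembled_lines
-- ===== SOURCE B (Python) =====
-- def assemble_lines(tagged_lines: list) -> list:
--     """Single linear pass: maintain the group being built (`current`) and
--     whether following lines are uppercased (`upper`); flush on each True line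
--     and at the end."""
--     cap_strings = {"<OBJ>", "<OTHER>", "<NAME>"}
--     assembled = []
--     current = None
--     upper = False
--     for text, tag, is_start in tagged_lines:
--         if is_start:
--             if current is not None:
--                 assembled.append(current)
--             if tag in cap_strings:
--                 current = tag + " " + text
--                 upper = True
--             else:
--                 current = text
--                 upper = False
--         elif current is not None:
--             current += " " + (text.upper() if upper else text)
--     if current is not None:
--         assembled.append(current)
--     return assembled
-- ===== Notes on version B (the rewrite author's own statement) =====
-- stated objective: simpler
-- what changed: Replaced the for-loop with a re-scanning inner while (each True line rescans the following False lines, which the outer for then revisits) by a single accumulator-driven pass keeping the current group and an upper-case flag, flushing on each True line and once at the end.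
import Mathlib
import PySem

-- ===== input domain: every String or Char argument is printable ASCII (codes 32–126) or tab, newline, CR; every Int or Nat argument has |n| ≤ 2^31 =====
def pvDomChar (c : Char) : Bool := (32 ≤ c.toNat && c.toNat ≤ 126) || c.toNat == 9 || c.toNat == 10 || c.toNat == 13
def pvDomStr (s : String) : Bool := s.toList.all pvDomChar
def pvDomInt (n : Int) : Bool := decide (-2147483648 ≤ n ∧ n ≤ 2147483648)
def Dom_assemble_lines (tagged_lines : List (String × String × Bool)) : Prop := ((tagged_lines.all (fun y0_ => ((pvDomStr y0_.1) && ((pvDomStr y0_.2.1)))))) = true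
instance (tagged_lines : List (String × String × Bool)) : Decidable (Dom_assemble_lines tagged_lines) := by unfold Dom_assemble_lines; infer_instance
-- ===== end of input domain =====

-- B replaces A's for-loop with rescanning inner whiles by a single accumulator pass (objective: simpler).

-- ===== PORT A =====
def pvCaps : List String := ["<OBJ>", "<OTHER>", "<NAME>"]

-- inner while of the plain branch: consume following False lines, appending their text
def pvWhilePlain (output : String) : List (String × String × Bool) → String
  | [] => output
  | l :: ls => if l.2.2 then output else pvWhilePlain (output ++ " " ++ l.1) ls

-- inner while of the cap branch: consume following False lines, appending upper-cased text
def pvWhileCap (output : String) : List (String × String × Bool) → String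
  | [] => output
  | l :: ls => if l.2.2 then output else pvWhileCap (output ++ " " ++ PySem.Str.upper l.1) ls

-- the for-loop of A: at each element, if its flag is True, scan the following
-- False lines (the inner while) and append the assembled group
def pvForA : List (String × String × Bool) → List String
  | [] => []
  | l :: ls =>
    (if l.2.2 then
      (if l.2.1 ∉ pvCaps then [pvWhilePlain l.1 ls]
       else [pvWhileCap (l.2.1 ++ " " ++ l.1) ls])
     else []) ++ pvForA ls

def assemble_lines (tagged_lines : List (String × String × Bool)) : List String :=
  pvForA tagged_lines

-- ===== PORT B =====
-- single pass: state = (assembled so far, current group as Option (text, upper-flag))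
def pvStepB (st : List String × Option (String × Bool)) (l : String × String × Bool) :
    List String × Option (String × Bool) :=
  if l.2.2 then
    let acc' := match st.2 with | none => st.1 | some cur => st.1 ++ [cur.1]
    if l.2.1 ∈ pvCaps then (acc', some (l.2.1 ++ " " ++ l.1, true))
    else (acc', some (l.1, false))
  else
    match st.2 with
    | none => st
    | some cur => (st.1, some (cur.1 ++ " " ++ (if cur.2 then PySem.Str.upper l.1 else l.1), cur.2))

def assemble_lines_alt (tagged_lines : List (String × String × Bool)) : List String :=
  let fin := tagged_lines.foldl pvStepB ([], none)
  match fin.2 with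
  | none => fin.1
  | some cur => fin.1 ++ [cur.1]

-- ===== PRECONDITION & SPEC =====
def Spec_assemble_lines (tagged_lines : List (String × String × Bool)) (out : List String) : Prop := out = assemble_lines_alt tagged_lines
instance (tagged_lines : List (String × String × Bool)) (out : List String) : Decidable (Spec_assemble_lines tagged_lines out) := by unfold Spec_assemble_lines; infer_instance

-- ===== CLAIM (what is proved, stated in full; the proofs are below) =====
def Claim_equal_assemble_lines : Prop := ∀ (tagged_lines : List (String × String × Bool)), Dom_assemble_lines tagged_lines → Spec_assemble_lines tagged_lines (assemble_lines tagged_lines)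

-- ===== LEMMAS AND PROOFS =====

-- flush of B's final state
def pvFin (st : List String × Option (String × Bool)) : List String :=
  match st.2 with
  | none => st.1
  | some cur => st.1 ++ [cur.1]

-- the pending-group invariant: with an open group (s, u), B's remaining fold emits
-- the group extended by the False-prefix of t (A's inner while), then A's output on t
theorem pvB_open (t : List (String × String × Bool)) :
    ∀ (acc : List String) (s : String) (u : Bool),
      pvFin (t.foldl pvStepB (acc, some (s, u))) =
        acc ++ (if u then pvWhileCap s t else pvWhilePlain s t) :: pvForA t := by
  induction t with
  | nil => intro acc s u; cases u <;> simp [pvFin, pvWhileCap, pvWhilePlain, pvForA]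
  | cons l ls ih =>
    intro acc s u
    by_cases hT : l.2.2
    · by_cases hC : l.2.1 ∈ pvCaps
      · simp [pvStepB, hT, hC, ih, pvForA, pvWhileCap, pvWhilePlain]
      · simp [pvStepB, hT, hC, ih, pvForA, pvWhileCap, pvWhilePlain]
    · cases u <;>
        simp [pvStepB, hT, ih, pvForA, pvWhileCap, pvWhilePlain]

-- with no open group, B's remaining fold produces exactly A's output on t
theorem pvB_closed (t : List (String × String × Bool)) :
    ∀ (acc : List String), pvFin (t.foldl pvStepB (acc, none)) = acc ++ pvForA t := by
  induction t with
  | nil => intro acc; simp [pvFin, pvForA]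
  | cons l ls ih =>
    intro acc
    by_cases hT : l.2.2
    · by_cases hC : l.2.1 ∈ pvCaps
      · simp [pvStepB, hT, hC, pvB_open, pvForA]
      · simp [pvStepB, hT, hC, pvB_open, pvForA]
    · simp [pvStepB, hT, ih, pvForA]

-- ===== VERDICT (by name: the statement is the Claim_ definition above) =====
theorem assemble_lines_spec : Claim_equal_assemble_lines := by
  intro t _
  show pvForA t = assemble_lines_alt t
  have h := pvB_closed t []
  simp only [List.nil_append] at h
  rw [assemble_lines_alt]
  exact h.symm ▸ rfl
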